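-- pv_equiv track=rewrite | github.com/Time-Coder/PyGPGPU | pygpgpu/vec_types/helper.py | generate_setter_swizzles
-- ===== SOURCE A (Python) =====
-- import itertools
-- from typing import List, Set, Dict
--
-- def generate_setter_swizzles(char_sets:List[str])->Set[str]:
--     result:List[str] = []
--     for char_set in char_sets:
--         prefix = 's' if char_set.startswith('0') else ''
--         for length in range(1, 4 + 1):
--             if length > len(char_set):
--                 continue
--
--             for combo in itertools.permutations(char_set, length):
--                 swizzle = prefix + ''.join(combo)
--                 result.append(swizzle)
--
--     return result
-- ===== SOURCE B (Python) =====
-- def generate_setter_swizzles(char_sets):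
--     result = []
--     for char_set in char_sets:
--         prefix = 's' if char_set.startswith('0') else ''
--         # frontier of partial swizzles: (built string, remaining character slots);
--         # slots are tuple positions, so equal characters stay distinct
--         frontier = [(prefix, tuple(char_set))]
--         for _ in range(min(4, len(char_set))):
--             frontier = [(s + c, rem[:k] + rem[k + 1:])
--                         for s, rem in frontier
--                         for k, c in enumerate(rem)]
--             result.extend(s for s, _ in frontier)
--     return result
-- ===== Notes on version B (the rewrite author's own statement) =====
-- stated objective: alternative
-- what changed: Replaces the four per-length itertools.permutations calls by a single breadth-first frontier of (picked-string, remaining-position-indices) pairs extended one character per level, emitting each level's swizzles as it is built.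
import Mathlib
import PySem

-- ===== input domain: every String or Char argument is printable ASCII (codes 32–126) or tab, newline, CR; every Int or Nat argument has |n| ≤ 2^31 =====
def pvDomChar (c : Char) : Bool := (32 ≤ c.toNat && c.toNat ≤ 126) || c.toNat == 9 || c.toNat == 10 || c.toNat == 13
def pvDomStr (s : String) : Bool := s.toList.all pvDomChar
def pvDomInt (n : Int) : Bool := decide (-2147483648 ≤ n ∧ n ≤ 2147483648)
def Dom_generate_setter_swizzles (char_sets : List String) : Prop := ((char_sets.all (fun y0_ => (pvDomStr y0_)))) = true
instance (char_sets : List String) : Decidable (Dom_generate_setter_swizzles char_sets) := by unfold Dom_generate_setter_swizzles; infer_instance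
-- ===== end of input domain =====

-- B replaces the per-length itertools.permutations calls by one breadth-first frontier of
-- (partial swizzle, remaining character slots) pairs, extended one character per level (objective: alternative).

-- ===== PORT A =====
-- Strings are handled on the List Char side (PySem convention): prefix + ''.join(combo)
-- is String.ofList (pre ++ combo).
def generate_setter_swizzles (char_sets : List String) : List String :=
  char_sets.foldl (fun result char_set =>
    let pre : List Char := if PySem.Str.startswith char_set "0" then ['s'] else []
    -- for length in range(1, 4 + 1): if length > len(char_set): continue; for combo in permutations(...)
    (PySem.List.pyRange 1 (4 + 1) 1).foldl (fun result length =>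
      if length > PySem.Str.len char_set then result
      else
        -- length ∈ 1..4 here, so length.toNat is exact
        result ++ (PySem.List.permutations char_set.toList length.toNat).map
          (fun combo => String.ofList (pre ++ combo))) result) []

-- ===== PORT B =====
-- frontier = [(s + c, rem[:k] + rem[k+1:]) for s, rem in frontier for k, c in enumerate(rem)]
-- (rem[:k] + rem[k+1:] is eraseIdx k since 0 ≤ k < len rem)
def pvStep (frontier : List (List Char × List Char)) : List (List Char × List Char) :=
  frontier.flatMap (fun p =>
    (PySem.List.enumerate p.2 0).map (fun kc =>
      (p.1 ++ [kc.2], p.2.eraseIdx kc.1.toNat)))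

-- the 'for _ in range(min(4, len(char_set)))' loop: extend the frontier, emit this level's swizzles
def pvBLevels : Nat → List (List Char × List Char) → List String
  | 0, _ => []
  | m + 1, frontier =>
      let f' := pvStep frontier
      f'.map (fun p => String.ofList p.1) ++ pvBLevels m f'

def generate_setter_swizzles_alt (char_sets : List String) : List String :=
  char_sets.foldl (fun result char_set =>
    let cs := char_set.toList
    let pre : List Char := if PySem.Str.startswith char_set "0" then ['s'] else []
    result ++ pvBLevels (min 4 cs.length) [(pre, cs)]) []

-- ===== PRECONDITION & SPEC =====
def Spec_generate_setter_swizzles (char_sets : List String) (out : List String) : Prop := out = generate_setter_swizzles_alt char_sets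
instance (char_sets : List String) (out : List String) : Decidable (Spec_generate_setter_swizzles char_sets out) := by unfold Spec_generate_setter_swizzles; infer_instance

-- ===== CLAIM (what is proved, stated in full; the proofs are below) =====
def Claim_equal_generate_setter_swizzles : Prop := ∀ (char_sets : List String), Dom_generate_setter_swizzles char_sets → Spec_generate_setter_swizzles char_sets (generate_setter_swizzles char_sets)

-- ===== LEMMAS AND PROOFS =====

-- proof-only: iterate pvStep
def pvStepN : Nat → List (List Char × List Char) → List (List Char × List Char)
  | 0, F => F
  | r + 1, F => pvStepN r (pvStep F)

-- proof-only: r-permutations of the remaining slots rem, as (picked, leftover) pairs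
def pvPermsR : Nat → List Char → List (List Char × List Char)
  | 0, rem => [([], rem)]
  | r + 1, rem => (List.range rem.length).flatMap (fun k =>
      (pvPermsR r (rem.eraseIdx k)).map (fun q => (rem.getD k ' ' :: q.1, q.2)))

lemma pvEnum_zero (rem : List Char) :
    PySem.List.enumerate rem 0 = (List.range rem.length).map (fun (k : Nat) => ((k : Int), rem.getD k ' ')) := by
  apply List.ext_getElem (by simp [PySem.List.length_enumerate])
  intro i h1 h2
  simp at h2
  simp [PySem.List.getElem_enumerate, h2]

lemma pvStep_append (F1 F2 : List (List Char × List Char)) :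
    pvStep (F1 ++ F2) = pvStep F1 ++ pvStep F2 := by
  simp [pvStep]

lemma pvStepN_append (r : Nat) (F1 F2 : List (List Char × List Char)) :
    pvStepN r (F1 ++ F2) = pvStepN r F1 ++ pvStepN r F2 := by
  induction r generalizing F1 F2 with
  | zero => rfl
  | succ r ih => simp [pvStepN, pvStep_append, ih]

lemma pvStepN_nil (r : Nat) : pvStepN r [] = [] := by
  induction r with
  | zero => rfl
  | succ r ih => simp [pvStepN, pvStep, ih]

lemma pvStepN_map {β : Type} (r : Nat) (l : List β) (g : β → List Char × List Char) :
    pvStepN r (l.map g) = l.flatMap (fun x => pvStepN r [g x]) := by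
  induction l with
  | nil => simp [pvStepN_nil]
  | cons x xs ih =>
      have : (g x :: xs.map g) = [g x] ++ xs.map g := rfl
      rw [List.map_cons, this, pvStepN_append, ih]; rfl

lemma pvStepN_singleton (r : Nat) (s rem : List Char) :
    pvStepN r [(s, rem)] = (pvPermsR r rem).map (fun q => (s ++ q.1, q.2)) := by
  induction r generalizing s rem with
  | zero => simp [pvStepN, pvPermsR]
  | succ r ih =>
      show pvStepN r (pvStep [(s, rem)]) = _
      have hstep : pvStep [(s, rem)] = (List.range rem.length).map
          (fun k => (s ++ [rem.getD k ' '], rem.eraseIdx k)) := by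
        simp [pvStep, pvEnum_zero, List.map_map]
      rw [hstep, pvStepN_map]
      simp only [ih]
      simp [pvPermsR, List.map_flatMap, List.map_map, Function.comp_def]

lemma pvBLevels_eq (m : Nat) (F : List (List Char × List Char)) :
    pvBLevels m F = (List.range m).flatMap
      (fun r => (pvStepN (r + 1) F).map (fun p => String.ofList p.1)) := by
  induction m generalizing F with
  | zero => simp [pvBLevels]
  | succ m ih =>
      rw [pvBLevels, ih, List.range_succ_eq_map]
      simp only [List.flatMap_cons, List.flatMap_map]
      rfl

lemma pvPermsR_fst (r : Nat) (rem : List Char) :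
    (pvPermsR r rem).map (fun q => q.1) = PySem.List.permutations rem r := by
  induction r generalizing rem with
  | zero => simp [pvPermsR, PySem.List.permutations]
  | succ r ih =>
      rw [pvPermsR, PySem.List.permutations]
      rw [List.map_flatMap]
      apply List.flatMap_congr
      intro k hk
      simp at hk
      rw [List.getElem?_eq_getElem hk, ← ih]
      simp [List.map_map, Function.comp_def]
      intro a b _
      simp [List.getElem?_eq_getElem hk]

-- one level of B's frontier names exactly A's permutations of that length
lemma pvLevel_eq (cs pre : List Char) (r : Nat) :
    (pvStepN (r + 1) [(pre, cs)]).map (fun p => String.ofList p.1)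
      = (PySem.List.permutations cs (r + 1)).map (fun combo => String.ofList (pre ++ combo)) := by
  rw [pvStepN_singleton, List.map_map, ← pvPermsR_fst, List.map_map]
  rfl

-- per-char_set equality of A's length loop and B's frontier loop
lemma pvPerSet (cs pre : List Char) (res : List String) :
    (PySem.List.pyRange 1 (4 + 1) 1).foldl (fun result length =>
      if length > (cs.length : Int) then result
      else result ++ (PySem.List.permutations cs length.toNat).map
        (fun combo => String.ofList (pre ++ combo))) res
    = res ++ pvBLevels (min 4 cs.length) [(pre, cs)] := by
  have hrange : PySem.List.pyRange 1 (4 + 1) 1 = [1, 2, 3, 4] := by decide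
  rw [hrange, pvBLevels_eq]
  simp only [pvLevel_eq]
  generalize cs.length = n
  rcases Nat.lt_or_ge n 4 with h | h
  · interval_cases n <;> simp [List.range_succ]
  · have hmin : min 4 n = 4 := by omega
    have h1 : ¬((1 : Int) > (n : Int)) := by omega
    have h2 : ¬((2 : Int) > (n : Int)) := by omega
    have h3 : ¬((3 : Int) > (n : Int)) := by omega
    have h4 : ¬((4 : Int) > (n : Int)) := by omega
    rw [hmin]
    simp [h1, h2, h3, h4, List.range_succ]

theorem pv_main (char_sets : List String) :
    generate_setter_swizzles char_sets = generate_setter_swizzles_alt char_sets := by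
  unfold generate_setter_swizzles generate_setter_swizzles_alt
  apply PySem.List.foldl_congr_mem
  intro acc x _
  simpa using pvPerSet x.toList (if PySem.Str.startswith x "0" then ['s'] else []) acc

-- ===== VERDICT (by name: the statement is the Claim_ definition above) =====
theorem generate_setter_swizzles_spec : Claim_equal_generate_setter_swizzles := by
  intro char_sets _
  unfold Spec_generate_setter_swizzles
  exact pv_main char_sets
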